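-- pv_equiv track=rewrite | github.com/harn1shmodi/CompassChat | backend/services/git_analysis.py | _extract_breaking_changes
-- ===== SOURCE A (Python) =====
-- from typing import List, Dict, Any, Optional
--
-- def _extract_breaking_changes(message: str, files_changed: List[Dict]) -> List[str]:
--     """Extract breaking changes from commit message and file changes"""
--     breaking_changes = []
--
--     # Check for breaking change indicators in message
--     message_lower = message.lower()
--     breaking_keywords = [
--         'breaking change', 'breaking:', 'break:', 'bc:', 'major:',
--         'incompatible', 'removes', 'deprecates', 'migration required'
--     ]
--
--     if any(keyword in message_lower for keyword in breaking_keywords):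
--         breaking_changes.append("Breaking change indicated in commit message")
--
--     # Check for potential breaking changes in files
--     api_files = [f for f in files_changed if 'api' in f['path'].lower() or 'interface' in f['path'].lower()]
--     if api_files:
--         breaking_changes.append("API or interface files modified")
--
--     # Check for version bumps that might indicate breaking changes
--     version_files = [f for f in files_changed if any(name in f['path'].lower() for name in ['package.json', 'setup.py', 'cargo.toml', 'pom.xml'])]
--     if version_files:
--         breaking_changes.append("Version files modified - check for major version bump")
--
--     return breaking_changes
-- ===== SOURCE B (Python) =====
-- from typing import List, Dict
--
-- _BREAKING_KEYWORDS = [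
--     'breaking change', 'breaking:', 'break:', 'bc:', 'major:',
--     'incompatible', 'removes', 'deprecates', 'migration required'
-- ]
-- _VERSION_NAMES = ['package.json', 'setup.py', 'cargo.toml', 'pom.xml']
--
-- def _extract_breaking_changes(message: str, files_changed: List[Dict]) -> List[str]:
--     """Single pass over files_changed with two flags instead of building two filtered lists."""
--     has_api = False
--     has_version = False
--     for f in files_changed:
--         p = f['path'].lower()
--         if 'api' in p or 'interface' in p:
--             has_api = True
--         if any(name in p for name in _VERSION_NAMES):
--             has_version = True
--     result = []
--     if any(kw in message.lower() for kw in _BREAKING_KEYWORDS):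
--         result.append("Breaking change indicated in commit message")
--     if has_api:
--         result.append("API or interface files modified")
--     if has_version:
--         result.append("Version files modified - check for major version bump")
--     return result
-- ===== Notes on version B (the rewrite author's own statement) =====
-- stated objective: simpler
-- what changed: Replaces A's two list-comprehension filters over files_changed (which build throwaway lists and lowercase each path twice) with a single pass maintaining two boolean flags, lowercasing each path once; the three messages are appended in the same order from the message test and the two flags.
import Mathlib
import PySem

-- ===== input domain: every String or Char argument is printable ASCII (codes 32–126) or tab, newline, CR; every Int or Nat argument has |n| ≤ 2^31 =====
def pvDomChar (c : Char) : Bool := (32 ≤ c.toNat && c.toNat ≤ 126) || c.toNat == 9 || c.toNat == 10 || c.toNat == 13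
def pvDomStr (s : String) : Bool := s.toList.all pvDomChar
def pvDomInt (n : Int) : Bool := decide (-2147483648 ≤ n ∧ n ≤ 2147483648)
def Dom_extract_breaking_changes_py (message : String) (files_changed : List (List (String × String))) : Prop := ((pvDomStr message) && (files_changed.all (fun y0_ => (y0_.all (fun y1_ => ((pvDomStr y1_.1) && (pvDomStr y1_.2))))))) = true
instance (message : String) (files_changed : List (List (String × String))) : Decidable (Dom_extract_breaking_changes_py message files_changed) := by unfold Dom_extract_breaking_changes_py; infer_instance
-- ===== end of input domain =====

-- One honest line: B replaces A's three separate scans of files_changed (two list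
-- comprehensions) by one pass maintaining two Boolean flags (objective: simpler).

-- ===== PORT A =====
-- f['path'] — total form of the Python dict lookup, valid only under Pre_ (key present)
def pvPathOf (f : List (String × String)) : String := (PySem.Dict.ofList f).getD "path" ""

def pvBreakingKeywords : List String :=
  ["breaking change", "breaking:", "break:", "bc:", "major:",
   "incompatible", "removes", "deprecates", "migration required"]

def pvVersionNames : List String := ["package.json", "setup.py", "cargo.toml", "pom.xml"]

def extract_breaking_changes_py (message : String) (files_changed : List (List (String × String))) : List String :=
  let breaking_changes : List String := []
  let message_lower := PySem.Str.lower message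
  let breaking_changes :=
    if pvBreakingKeywords.any (fun kw => PySem.Str.isIn kw message_lower) then
      breaking_changes ++ ["Breaking change indicated in commit message"]
    else breaking_changes
  let api_files := files_changed.filter (fun f =>
    PySem.Str.isIn "api" (PySem.Str.lower (pvPathOf f)) ||
    PySem.Str.isIn "interface" (PySem.Str.lower (pvPathOf f)))
  let breaking_changes :=
    if !api_files.isEmpty then breaking_changes ++ ["API or interface files modified"]
    else breaking_changes
  let version_files := files_changed.filter (fun f =>
    pvVersionNames.any (fun name => PySem.Str.isIn name (PySem.Str.lower (pvPathOf f))))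
  let breaking_changes :=
    if !version_files.isEmpty then
      breaking_changes ++ ["Version files modified - check for major version bump"]
    else breaking_changes
  breaking_changes

-- ===== PORT B =====
def extract_breaking_changes_py_alt (message : String) (files_changed : List (List (String × String))) : List String :=
  let flags := files_changed.foldl (fun (st : Bool × Bool) f =>
    let p := PySem.Str.lower (pvPathOf f)
    ((st.1 || (PySem.Str.isIn "api" p || PySem.Str.isIn "interface" p)),
     (st.2 || pvVersionNames.any (fun name => PySem.Str.isIn name p)))) (false, false)
  let result : List String := []
  let result :=
    if pvBreakingKeywords.any (fun kw => PySem.Str.isIn kw (PySem.Str.lower message)) then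
      result ++ ["Breaking change indicated in commit message"]
    else result
  let result := if flags.1 then result ++ ["API or interface files modified"] else result
  let result :=
    if flags.2 then result ++ ["Version files modified - check for major version bump"]
    else result
  result

-- ===== PRECONDITION & SPEC =====
-- Pre_ excludes files lacking a 'path' key, on which A raises KeyError.
def Pre_extract_breaking_changes_py (message : String) (files_changed : List (List (String × String))) : Prop :=
  ∀ f ∈ files_changed, (PySem.Dict.ofList f).contains "path" = true
instance (message : String) (files_changed : List (List (String × String))) : Decidable (Pre_extract_breaking_changes_py message files_changed) := by unfold Pre_extract_breaking_changes_py; infer_instance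
def pvWitness_extract_breaking_changes_py : String × (List (List (String × String))) :=
  ("breaking: drop v1", [[("path", "src/api/v1.py")], [("path", "package.json")]])
def Spec_extract_breaking_changes_py (message : String) (files_changed : List (List (String × String))) (out : List String) : Prop := out = extract_breaking_changes_py_alt message files_changed
instance (message : String) (files_changed : List (List (String × String))) (out : List String) : Decidable (Spec_extract_breaking_changes_py message files_changed out) := by unfold Spec_extract_breaking_changes_py; infer_instance

-- ===== CLAIM (what is proved, stated in full; the proofs are below) =====
def Claim_equal_extract_breaking_changes_py : Prop := ∀ (message : String) (files_changed : List (List (String × String))), Dom_extract_breaking_changes_py message files_changed → Pre_extract_breaking_changes_py message files_changed → Spec_extract_breaking_changes_py message files_changed (extract_breaking_changes_py message files_changed)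

-- ===== LEMMAS AND PROOFS =====

-- B's flag-fold computes exactly (any p, any q) over files_changed.
theorem pvFoldFlags (p q : List (String × String) → Bool)
    (xs : List (List (String × String))) (a b : Bool) :
    xs.foldl (fun (st : Bool × Bool) f => (st.1 || p f, st.2 || q f)) (a, b)
      = (a || xs.any p, b || xs.any q) := by
  induction xs generalizing a b with
  | nil => simp
  | cons x t ih => simp [List.foldl_cons, ih, Bool.or_assoc]

-- A's truthiness test on a filtered list equals an `any` over the predicate.
theorem pvFilterNonempty (p : List (String × String) → Bool)
    (xs : List (List (String × String))) :
    (!(xs.filter p).isEmpty) = xs.any p := by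
  induction xs with
  | nil => simp
  | cons x t ih =>
    by_cases h : p x <;> simp [h, ih]

-- ===== VERDICT (by name: the statement is the Claim_ definition above) =====
theorem extract_breaking_changes_py_spec : Claim_equal_extract_breaking_changes_py := by
  intro message files_changed _ _
  unfold Spec_extract_breaking_changes_py extract_breaking_changes_py extract_breaking_changes_py_alt
  simp only []
  rw [pvFoldFlags, pvFilterNonempty, pvFilterNonempty, Bool.false_or, Bool.false_or]
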